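-- pv_equiv track=rewrite | github.com/Cookiecodess/aoc2025 | 06/part1.py | solve_problems
-- ===== SOURCE A (Python) =====
-- def sum(start, end, probs, col):
--     total=0
--     for i in range(start, end):
--         total+= int(probs[i][col])
--     return total
--
-- def mult(start, end, probs, col):
--     total=1
--     for i in range(start, end):
--         total *= int(probs[i][col])
--     return total
--
-- def solve_problems(problems):
--     finalresult=0
--     for col in range(len(problems[0])):
--         if problems[-1][col] == "+":
--             op = sum
--         else:
--             op = mult
--         finalresult += op(0, len(problems)-1, problems, col)
--
--     return finalresult
-- ===== SOURCE B (Python) =====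
-- def solve_problems(problems):
--     ncols = len(problems[0])
--     ops = [problems[-1][c] == "+" for c in range(ncols)]
--     acc = [0 if p else 1 for p in ops]
--     for i in range(len(problems) - 1):
--         row = problems[i]
--         acc = [acc[c] + int(row[c]) if ops[c] else acc[c] * int(row[c])
--                for c in range(ncols)]
--     total = 0
--     for v in acc:
--         total += v
--     return total
-- ===== Notes on version B (the rewrite author's own statement) =====
-- stated objective: alternative
-- what changed: Replaced A's column-by-column passes (a fresh sum/mult helper scan per column) by a single row-major pass that maintains one per-column accumulator list initialised from the operator row, then totals the accumulators.
import Mathlib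
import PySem

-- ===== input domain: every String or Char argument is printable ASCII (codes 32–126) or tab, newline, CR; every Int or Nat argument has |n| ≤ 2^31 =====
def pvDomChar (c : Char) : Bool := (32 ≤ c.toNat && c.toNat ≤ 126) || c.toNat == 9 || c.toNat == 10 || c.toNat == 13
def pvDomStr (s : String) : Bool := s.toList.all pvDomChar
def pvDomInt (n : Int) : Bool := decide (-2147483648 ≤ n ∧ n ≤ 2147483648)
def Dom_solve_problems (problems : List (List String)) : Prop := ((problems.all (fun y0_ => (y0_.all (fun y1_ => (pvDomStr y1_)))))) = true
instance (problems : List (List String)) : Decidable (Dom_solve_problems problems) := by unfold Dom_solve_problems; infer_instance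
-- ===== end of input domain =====

-- B replaces A's per-column helper scans by one row-major pass over a per-column
-- accumulator list (alternative decomposition, same cost).

-- ===== PORT A =====
-- module-level helper `sum` of Source A
def pySumA (start stop : Int) (probs : List (List String)) (col : Int) : Int :=
  (PySem.List.pyRange start stop 1).foldl
    (fun total i =>
      total + ((((PySem.List.pyGet? probs i).bind
        (fun r => PySem.List.pyGet? r col)).bind PySem.Int.ofStr?).getD 0)) 0

-- module-level helper `mult` of Source A
def pyMultA (start stop : Int) (probs : List (List String)) (col : Int) : Int :=
  (PySem.List.pyRange start stop 1).foldl
    (fun total i =>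
      total * ((((PySem.List.pyGet? probs i).bind
        (fun r => PySem.List.pyGet? r col)).bind PySem.Int.ofStr?).getD 0)) 1

def solve_problems (problems : List (List String)) : Int :=
  (PySem.List.pyRange 0 (((PySem.List.pyGet? problems 0).getD []).length : Int) 1).foldl
    (fun finalresult col =>
      finalresult +
        (if ((PySem.List.pyGet? problems (-1)).bind
              (fun r => PySem.List.pyGet? r col)) = some "+" then
          pySumA 0 ((problems.length : Int) - 1) problems col
        else
          pyMultA 0 ((problems.length : Int) - 1) problems col)) 0

-- ===== PORT B =====
def solve_problems_alt (problems : List (List String)) : Int :=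
  let ncols := ((PySem.List.pyGet? problems 0).getD []).length
  let lastRow := (PySem.List.pyGet? problems (-1)).getD []
  let ops : List Bool :=
    (List.range ncols).map (fun (c : Nat) => PySem.List.pyGet? lastRow ((c : Nat) : Int) == some "+")
  let acc0 : List Int := ops.map (fun p => if p then 0 else 1)
  let accN :=
    (PySem.List.pyRange 0 ((problems.length : Int) - 1) 1).foldl
      (fun acc i =>
        let row := (PySem.List.pyGet? problems i).getD []
        (List.range ncols).map (fun (c : Nat) =>
          let v := ((PySem.List.pyGet? row ((c : Nat) : Int)).bind PySem.Int.ofStr?).getD 0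
          if ops.getD c false then acc.getD c 0 + v else acc.getD c 0 * v))
      acc0
  accN.foldl (· + ·) 0

-- ===== PRECONDITION & SPEC =====
-- Pre_ excludes exactly the inputs where the Python A raises: the empty list
-- (IndexError on problems[0]), rows too short for the columns of row 0
-- (IndexError), and data-row cells that int() rejects (ValueError).
def Pre_solve_problems (problems : List (List String)) : Prop :=
  problems ≠ [] ∧
  (problems.headD []).length ≤ (problems.getLastD []).length ∧
  ∀ row ∈ problems.dropLast,
    (problems.headD []).length ≤ row.length ∧
    ∀ c < (problems.headD []).length, (PySem.Int.ofStr? (row.getD c "")).isSome = true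
instance (problems : List (List String)) : Decidable (Pre_solve_problems problems) := by
  unfold Pre_solve_problems; infer_instance

def pvWitness_solve_problems : List (List String) := [["1","2"],["3","4"],["+","*"]]

def Spec_solve_problems (problems : List (List String)) (out : Int) : Prop := out = solve_problems_alt problems
instance (problems : List (List String)) (out : Int) : Decidable (Spec_solve_problems problems out) := by unfold Spec_solve_problems; infer_instance

-- ===== CLAIM (what is proved, stated in full; the proofs are below) =====
def Claim_equal_solve_problems : Prop := ∀ (problems : List (List String)), Dom_solve_problems problems → Pre_solve_problems problems → Spec_solve_problems problems (solve_problems problems)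

-- ===== LEMMAS AND PROOFS =====

-- the two ports read a cell probs[i][col] through slightly different option plumbing
theorem cell_eq (probs : List (List String)) (i col : Int) :
    ((((PySem.List.pyGet? probs i).bind
        (fun r => PySem.List.pyGet? r col)).bind PySem.Int.ofStr?).getD 0)
      = ((PySem.List.pyGet? ((PySem.List.pyGet? probs i).getD []) col).bind
          PySem.Int.ofStr?).getD 0 := by
  cases h : PySem.List.pyGet? probs i <;> simp [PySem.List.pyGet?]

-- the operator test through bind equals the test on the defaulted last row
theorem op_eq (probs : List (List String)) (col : Int) :
    (((PySem.List.pyGet? probs (-1)).bind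
        (fun r => PySem.List.pyGet? r col)) = some "+")
      ↔ (PySem.List.pyGet? ((PySem.List.pyGet? probs (-1)).getD []) col = some "+") := by
  cases h : PySem.List.pyGet? probs (-1) <;> simp [PySem.List.pyGet?]

theorem getD_map_range' {α : Type} (g : Nat → α) (n c : Nat) (d : α) (hc : c < n) :
    ((List.range n).map g).getD c d = g c := by
  simp [List.getD, hc]

-- row-major fold over a per-column accumulator list = per-column folds
theorem interchange {α : Type} (n : Nat) (h : α → Int → Nat → Int) (L : List α)
    (g : Nat → Int) :
    L.foldl (fun acc i => (List.range n).map (fun c => h i (acc.getD c 0) c))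
        ((List.range n).map g)
      = (List.range n).map (fun c => L.foldl (fun t i => h i t c) (g c)) := by
  induction L generalizing g with
  | nil => rfl
  | cons i L ih =>
      simp only [List.foldl_cons]
      have : (List.range n).map (fun c => h i (((List.range n).map g).getD c 0) c)
          = (List.range n).map (fun c => h i (g c) c) := by
        apply List.map_congr_left
        intro c hc
        rw [getD_map_range' g n c 0 (List.mem_range.mp hc)]
      rw [this, ih (fun c => h i (g c) c)]

theorem foldl_add_sum (L : List Int) (init : Int) :
    L.foldl (· + ·) init = init + L.sum := by
  induction L generalizing init with
  | nil => simp
  | cons x L ih => simp [List.foldl_cons, ih, add_assoc]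

theorem foldl_map_add {α : Type} (L : List α) (F : α → Int) (init : Int) :
    L.foldl (fun acc x => acc + F x) init = init + (L.map F).sum := by
  induction L generalizing init with
  | nil => simp
  | cons x L ih => simp [List.foldl_cons, ih, add_assoc]

theorem ports_eq (problems : List (List String)) :
    solve_problems problems = solve_problems_alt problems := by
  unfold solve_problems solve_problems_alt
  simp only []
  set ncols := ((PySem.List.pyGet? problems 0).getD []).length with hn
  set lastRow := (PySem.List.pyGet? problems (-1)).getD [] with hl
  set L := PySem.List.pyRange 0 ((problems.length : Int) - 1) 1 with hL
  set ops : List Bool :=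
    (List.range ncols).map (fun (c : Nat) => PySem.List.pyGet? lastRow (c : Int) == some "+")
    with hops
  -- B side: interchange the fold and the map, then sum
  have hinit : (ops.map (fun p => if p then 0 else (1:Int)))
      = (List.range ncols).map
          (fun (c : Nat) => if PySem.List.pyGet? lastRow (c : Int) == some "+" then (0:Int) else 1) := by
    rw [hops, List.map_map]; rfl
  have hopsD : ∀ c < ncols, ops.getD c false
      = (PySem.List.pyGet? lastRow (c : Int) == some "+") := by
    intro c hc
    rw [hops, getD_map_range' _ ncols c false hc]
  have hstep : ∀ (acc : List Int) (i : Int),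
      (List.range ncols).map (fun (c : Nat) =>
        let v := ((PySem.List.pyGet? ((PySem.List.pyGet? problems i).getD []) (c : Int)).bind
          PySem.Int.ofStr?).getD 0
        if ops.getD c false then acc.getD c 0 + v else acc.getD c 0 * v)
      = (List.range ncols).map (fun (c : Nat) =>
        (fun (i : Int) (t : Int) (c : Nat) =>
          let v := ((PySem.List.pyGet? ((PySem.List.pyGet? problems i).getD []) (c : Int)).bind
            PySem.Int.ofStr?).getD 0
          if PySem.List.pyGet? lastRow (c : Int) == some "+" then t + v else t * v)
          i (acc.getD c 0) c) := by
    intro acc i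
    apply List.map_congr_left
    intro c hc
    rw [hopsD c (List.mem_range.mp hc)]
  have hB : (L.foldl
      (fun acc i =>
        let row := (PySem.List.pyGet? problems i).getD []
        (List.range ncols).map (fun (c : Nat) =>
          let v := ((PySem.List.pyGet? row (c : Int)).bind PySem.Int.ofStr?).getD 0
          if ops.getD c false then acc.getD c 0 + v else acc.getD c 0 * v))
      (ops.map (fun p => if p then 0 else 1)))
      = (List.range ncols).map (fun (c : Nat) =>
          L.foldl (fun t i =>
            let v := ((PySem.List.pyGet? ((PySem.List.pyGet? problems i).getD []) (c : Int)).bind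
              PySem.Int.ofStr?).getD 0
            if PySem.List.pyGet? lastRow (c : Int) == some "+" then t + v else t * v)
            (if PySem.List.pyGet? lastRow (c : Int) == some "+" then 0 else 1)) := by
    rw [hinit]
    have := interchange ncols
      (fun (i : Int) (t : Int) (c : Nat) =>
        let v := ((PySem.List.pyGet? ((PySem.List.pyGet? problems i).getD []) (c : Int)).bind
          PySem.Int.ofStr?).getD 0
        if PySem.List.pyGet? lastRow (c : Int) == some "+" then t + v else t * v)
      L (fun (c : Nat) => if PySem.List.pyGet? lastRow (c : Int) == some "+" then (0:Int) else 1)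
    rw [← this]
    have hf : (fun (acc : List Int) (i : Int) =>
        let row := (PySem.List.pyGet? problems i).getD []
        (List.range ncols).map (fun (c : Nat) =>
          let v := ((PySem.List.pyGet? row (c : Int)).bind PySem.Int.ofStr?).getD 0
          if ops.getD c false then acc.getD c 0 + v else acc.getD c 0 * v))
      = (fun (acc : List Int) (i : Int) =>
        (List.range ncols).map (fun (c : Nat) =>
          (fun (i : Int) (t : Int) (c : Nat) =>
            let v := ((PySem.List.pyGet? ((PySem.List.pyGet? problems i).getD []) (c : Int)).bind
              PySem.Int.ofStr?).getD 0
            if PySem.List.pyGet? lastRow (c : Int) == some "+" then t + v else t * v)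
            i (acc.getD c 0) c)) := by
      funext acc i
      exact hstep acc i
    rw [hf]
  rw [hB, foldl_add_sum]
  -- A side: turn the column fold into a sum over List.range ncols
  rw [PySem.List.pyRange_zero_nat]
  rw [foldl_map_add]
  simp only [zero_add]
  rw [List.map_map]
  congr 1
  apply List.map_congr_left
  intro c hc
  simp only [Function.comp]
  -- per-column equality
  by_cases hop : PySem.List.pyGet? lastRow (c : Int) = some "+"
  · have hop' : ((PySem.List.pyGet? problems (-1)).bind
        (fun r => PySem.List.pyGet? r (c : Int))) = some "+" :=
      (op_eq problems (c : Int)).mpr (by rw [← hl]; exact hop)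
    rw [if_pos hop']
    simp only [hop, beq_self_eq_true, if_pos]
    unfold pySumA
    rw [← hL]
    have hf : (fun (total : Int) (i : Int) =>
        total + ((((PySem.List.pyGet? problems i).bind
          (fun r => PySem.List.pyGet? r (c : Int))).bind PySem.Int.ofStr?).getD 0))
      = (fun (t : Int) (i : Int) =>
        t + ((PySem.List.pyGet? ((PySem.List.pyGet? problems i).getD []) (c : Int)).bind
          PySem.Int.ofStr?).getD 0) := by
      funext t i
      rw [cell_eq]
    rw [hf]
  · rw [if_neg (fun h => hop (by rw [hl]; exact (op_eq problems (c : Int)).mp h))]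
    have hfalse : (PySem.List.pyGet? lastRow (c : Int) == some "+") = false := by
      rw [beq_eq_false_iff_ne]
      exact hop
    simp only [hfalse, Bool.false_eq_true, if_false]
    unfold pyMultA
    rw [← hL]
    have hf : (fun (total : Int) (i : Int) =>
        total * ((((PySem.List.pyGet? problems i).bind
          (fun r => PySem.List.pyGet? r (c : Int))).bind PySem.Int.ofStr?).getD 0))
      = (fun (t : Int) (i : Int) =>
        t * ((PySem.List.pyGet? ((PySem.List.pyGet? problems i).getD []) (c : Int)).bind
          PySem.Int.ofStr?).getD 0) := by
      funext t i
      rw [cell_eq]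
    rw [hf]

-- ===== VERDICT (by name: the statement is the Claim_ definition above) =====
theorem solve_problems_spec : Claim_equal_solve_problems := by
  intro problems _ _
  unfold Spec_solve_problems
  exact ports_eq problems
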